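-- pv_equiv track=rewrite | github.com/UKGANG/Leetcode | pointer/EfficientHarvest.py | effHarvest
-- ===== SOURCE A (Python) =====
-- from typing import List
--
-- def effHarvest(arr: List[int], k: int) -> int:
--     arr_pair = []
--     n = len(arr) >> 1
--     for i in range(n):
--         arr_pair.append(arr[i] + arr[i + n])
--
--     if k >= len(arr_pair):
--         return sum(arr_pair)
--     curr = sum(arr_pair[:k])
--     res = curr
--     for i in range(k, len(arr_pair)):
--         curr = curr - arr_pair[i - k] + arr_pair[i]
--         res = max(res, curr)
--
--     return res
-- ===== SOURCE B (Python) =====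
-- from typing import List
--
-- def effHarvest(arr: List[int], k: int) -> int:
--     n = len(arr) >> 1
--     pair = [arr[i] + arr[i + n] for i in range(n)]
--     prefix = [0]
--     for x in pair:
--         prefix.append(prefix[-1] + x)
--     if k >= n:
--         return prefix[n]
--     return max(prefix[i + k] - prefix[i] for i in range(n - k + 1))
-- ===== Notes on version B (the rewrite author's own statement) =====
-- stated objective: alternative
-- what changed: Replaces A's incremental sliding-window (running sum updated by subtract/add each step) with a prefix-sum table: B builds prefix sums of the pair array once and takes the max of prefix[i+k]-prefix[i] over all window starts.
import Mathlib
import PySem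

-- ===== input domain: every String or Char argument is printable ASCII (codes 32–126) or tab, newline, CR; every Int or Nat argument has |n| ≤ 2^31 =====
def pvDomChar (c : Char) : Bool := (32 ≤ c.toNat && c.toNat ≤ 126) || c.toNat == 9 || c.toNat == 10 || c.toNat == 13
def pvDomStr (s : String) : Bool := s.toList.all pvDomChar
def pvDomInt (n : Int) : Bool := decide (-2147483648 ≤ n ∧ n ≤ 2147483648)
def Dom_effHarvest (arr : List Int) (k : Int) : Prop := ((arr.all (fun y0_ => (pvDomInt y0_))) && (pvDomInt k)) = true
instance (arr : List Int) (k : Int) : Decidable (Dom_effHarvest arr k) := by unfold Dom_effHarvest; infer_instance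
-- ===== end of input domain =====

-- B replaces A's incremental sliding-window accumulator by a prefix-sum table (same return value on Pre_; no speed claim).

-- ===== PORT A =====
def effHarvest (arr : List Int) (k : Int) : Int :=
  let n : Nat := arr.length / 2
  let arr_pair : List Int :=
    (PySem.List.pyRange 0 (n : Int) 1).foldl
      (fun acc i => acc ++ [PySem.List.pyGetD arr i 0 + PySem.List.pyGetD arr (i + (n : Int)) 0]) []
  if (arr_pair.length : Int) ≤ k then arr_pair.sum
  else
    let curr0 : Int := (PySem.List.slice arr_pair none (some k)).sum
    let st := (PySem.List.pyRange k (arr_pair.length : Int) 1).foldl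
      (fun (cr : Int × Int) i =>
        let c := cr.1 - PySem.List.pyGetD arr_pair (i - k) 0 + PySem.List.pyGetD arr_pair i 0
        (c, max cr.2 c)) (curr0, curr0)
    st.2

-- ===== PORT B =====
def effHarvest_alt (arr : List Int) (k : Int) : Int :=
  let n : Nat := arr.length / 2
  let pair : List Int := (PySem.List.pyRange 0 (n : Int) 1).map
    (fun i => PySem.List.pyGetD arr i 0 + PySem.List.pyGetD arr (i + (n : Int)) 0)
  let pfx : List Int := pair.foldl (fun acc x => acc ++ [PySem.List.pyGetD acc (-1) 0 + x]) [0]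
  if (n : Int) ≤ k then PySem.List.pyGetD pfx (n : Int) 0
  else
    let vals : List Int := (PySem.List.pyRange 0 ((n : Int) - k + 1) 1).map
      (fun i => PySem.List.pyGetD pfx (i + k) 0 - PySem.List.pyGetD pfx i 0)
    match vals with
    | [] => 0  -- unreachable under Pre_ (0 ≤ k < n gives a nonempty generator; Python's max would raise on empty)
    | h :: t => t.foldl max h

-- ===== PRECONDITION & SPEC =====
-- Pre_ excludes exactly the inputs with k < 0, on every one of which the Python A raises IndexError
-- (the loop index i-k overruns arr_pair; for an empty arr_pair the negative index itself is out of range).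
def Pre_effHarvest (arr : List Int) (k : Int) : Prop := 0 ≤ k
instance (arr : List Int) (k : Int) : Decidable (Pre_effHarvest arr k) := by unfold Pre_effHarvest; infer_instance
def pvWitness_effHarvest : List Int × Int := ([1, 2, 3, 4], 1)
def Spec_effHarvest (arr : List Int) (k : Int) (out : Int) : Prop := out = effHarvest_alt arr k
instance (arr : List Int) (k : Int) (out : Int) : Decidable (Spec_effHarvest arr k out) := by unfold Spec_effHarvest; infer_instance

-- ===== CLAIM (what is proved, stated in full; the proofs are below) =====
def Claim_equal_effHarvest : Prop := ∀ (arr : List Int) (k : Int), Dom_effHarvest arr k → Pre_effHarvest arr k → Spec_effHarvest arr k (effHarvest arr k)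

-- ===== LEMMAS AND PROOFS =====

-- prefix sums of the first i elements
def pvTakeSum (p : List Int) (i : Nat) : Int := (p.take i).sum

theorem pvSum_take_succ (p : List Int) (i : Nat) (h : i < p.length) :
    pvTakeSum p (i + 1) = pvTakeSum p i + p.getD i 0 := by
  unfold pvTakeSum
  rw [List.sum_take_succ p i h]
  simp [List.getD_eq_getElem?_getD, List.getElem?_eq_getElem h]

-- B's prefix-list build equals the table of take-sums
theorem pvPrefix_build (p acc : List Int) (s : Int)
    (hlast : PySem.List.pyGetD acc (-1) 0 = s) :
    p.foldl (fun a x => a ++ [PySem.List.pyGetD a (-1) 0 + x]) acc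
      = acc ++ (List.range p.length).map (fun i => s + pvTakeSum p (i + 1)) := by
  induction p generalizing acc s with
  | nil => simp
  | cons x xs ih =>
    simp only [List.foldl_cons, hlast]
    rw [ih (acc ++ [s + x]) (s + x) (by simp [PySem.List.pyGetD_neg_one_append_singleton])]
    simp only [List.length_cons, List.range_succ_eq_map, List.map_cons, List.map_map]
    simp [pvTakeSum, List.append_assoc, Function.comp, add_assoc]

theorem pvPrefix_eq (p : List Int) :
    p.foldl (fun a x => a ++ [PySem.List.pyGetD a (-1) 0 + x]) [0]
      = (List.range (p.length + 1)).map (pvTakeSum p) := by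
  rw [pvPrefix_build p [0] 0 (by decide)]
  rw [List.range_succ_eq_map, List.map_cons, List.map_map]
  simp [pvTakeSum]

theorem pvPrefix_getD (p : List Int) (N i : Nat) (h : i ≤ N) :
    ((List.range (N + 1)).map (pvTakeSum p)).getD i 0 = pvTakeSum p i := by
  rw [List.getD_eq_getElem?_getD, List.getElem?_map, List.getElem?_range (by omega)]
  simp

-- the window value starting at j, window length kn
def pvW (p : List Int) (kn j : Nat) : Int := pvTakeSum p (j + kn) - pvTakeSum p j

-- A's loop invariant
theorem pvLoopA (p : List Int) (kn : Nat) (m : Nat) (hm : m + kn ≤ p.length) :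
    (List.range m).foldl
      (fun (cr : Int × Int) t =>
        (cr.1 - p.getD t 0 + p.getD (t + kn) 0,
          max cr.2 (cr.1 - p.getD t 0 + p.getD (t + kn) 0))) (pvW p kn 0, pvW p kn 0)
      = (pvW p kn m, (List.range m).foldl (fun acc t => max acc (pvW p kn (t + 1))) (pvW p kn 0)) := by
  induction m with
  | zero => simp
  | succ m ih =>
    rw [List.range_succ, List.foldl_append, List.foldl_append, ih (by omega)]
    simp only [List.foldl_cons, List.foldl_nil]
    have hc : pvW p kn m - p.getD m 0 + p.getD (m + kn) 0 = pvW p kn (m + 1) := by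
      have h1 : pvTakeSum p (m + kn + 1) = pvTakeSum p (m + kn) + p.getD (m + kn) 0 :=
        pvSum_take_succ p (m + kn) (by omega)
      have h2 : pvTakeSum p (m + 1) = pvTakeSum p m + p.getD m 0 :=
        pvSum_take_succ p m (by omega)
      unfold pvW
      have : m + 1 + kn = m + kn + 1 := by omega
      rw [this, h1, h2]; ring
    rw [hc]

theorem effHarvest_eq_alt (arr : List Int) (k : Int) (hk : 0 ≤ k) :
    effHarvest arr k = effHarvest_alt arr k := by
  simp only [effHarvest, effHarvest_alt]
  rw [PySem.List.foldl_append_singleton_eq_map]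
  rw [List.nil_append]
  set n : Nat := arr.length / 2 with hn
  set f : Int → Int := fun i => PySem.List.pyGetD arr i 0 + PySem.List.pyGetD arr (i + (n:Int)) 0 with hf
  set p : List Int := (PySem.List.pyRange 0 (n : Int) 1).map f with hp
  have hlen : p.length = n := by
    simp [hp, PySem.List.length_pyRange_one]
  clear_value p f n
  rw [pvPrefix_eq]
  simp only [hlen]
  by_cases hkn : (n : Int) ≤ k
  · rw [if_pos hkn, if_pos hkn]
    rw [PySem.List.pyGetD_natCast]
    rw [show ((List.range (n + 1)).map (pvTakeSum p)).getD n 0 = pvTakeSum p n from by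
      rw [show n = p.length from hlen.symm]; exact pvPrefix_getD p p.length p.length (le_refl _)]
    simp [pvTakeSum, hlen.symm]
  · rw [if_neg hkn, if_neg hkn]
    set kn : Nat := k.toNat with hknn
    clear_value kn
    have hkc : (kn : Int) = k := by rw [hknn]; exact Int.toNat_of_nonneg hk
    have hklt : kn < n := by omega
    set m : Nat := n - kn with hm
    clear_value m
    -- A side
    have hcurr : (PySem.List.slice p none (some k)).sum = pvW p kn 0 := by
      rw [PySem.List.slice_to p hk, ← hknn]
      simp [pvW, pvTakeSum]
    rw [hcurr]
    have hrangeA : PySem.List.pyRange k (n : Int) 1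
        = (List.range m).map (fun t : Nat => k + (t : Int)) := by
      have hh : ((n : Int) - k).toNat = m := by rw [hm, ← hkc]; omega
      rw [PySem.List.pyRange_one, hh]
    rw [hrangeA, List.foldl_map]
    have hfg : ∀ (cr : Int × Int) (t : Nat), t ∈ List.range m →
        ((cr.1 - PySem.List.pyGetD p (k + (t:Int) - k) 0 + PySem.List.pyGetD p (k + (t:Int)) 0,
          max cr.2 (cr.1 - PySem.List.pyGetD p (k + (t:Int) - k) 0 + PySem.List.pyGetD p (k + (t:Int)) 0)) : Int × Int) =
        (cr.1 - p.getD t 0 + p.getD (t + kn) 0,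
          max cr.2 (cr.1 - p.getD t 0 + p.getD (t + kn) 0)) := by
      intro cr t ht
      have h1 : k + (t:Int) - k = ((t : Nat) : Int) := by ring
      have h2 : k + (t:Int) = ((t + kn : Nat) : Int) := by push_cast [← hkc]; ring
      rw [h1, h2, PySem.List.pyGetD_natCast, PySem.List.pyGetD_natCast]
    rw [PySem.List.foldl_congr_mem (List.range m) _ _ _ hfg, pvLoopA p kn m (by rw [hlen]; omega)]
    -- B side
    have hrangeB : PySem.List.pyRange 0 ((n : Int) - k + 1) 1
        = (List.range (m + 1)).map (fun j : Nat => (j : Int)) := by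
      have hh : ((n : Int) - k + 1 - 0).toNat = m + 1 := by rw [hm, ← hkc]; omega
      rw [PySem.List.pyRange_one, hh]
      exact List.map_congr_left (fun x _ => by rw [zero_add])
    have hBlist : List.map
        (fun i => PySem.List.pyGetD (List.map (pvTakeSum p) (List.range (n + 1))) (i + k) 0 -
            PySem.List.pyGetD (List.map (pvTakeSum p) (List.range (n + 1))) i 0)
        (PySem.List.pyRange 0 ((n:Int) - k + 1) 1)
        = pvW p kn 0 :: List.map (fun t => pvW p kn (t + 1)) (List.range m) := by
      rw [hrangeB, List.map_map]
      simp only [Function.comp_def]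
      have hmap : (List.range (m+1)).map (fun j : Nat =>
          PySem.List.pyGetD (List.map (pvTakeSum p) (List.range (n + 1))) ((j:Int) + k) 0 -
          PySem.List.pyGetD (List.map (pvTakeSum p) (List.range (n + 1))) ((j:Nat):Int) 0)
          = (List.range (m+1)).map (pvW p kn) := by
        apply List.map_congr_left
        intro j hj
        have hj' : j ≤ m := by simp only [List.mem_range] at hj; omega
        have h2 : (j:Int) + k = ((j + kn : Nat) : Int) := by push_cast [← hkc]; ring
        rw [h2, PySem.List.pyGetD_natCast, PySem.List.pyGetD_natCast,
          pvPrefix_getD p n (j + kn) (by omega), pvPrefix_getD p n j (by omega)]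
        rfl
      rw [hmap, List.range_succ_eq_map, List.map_cons, List.map_map]
      rfl
    rw [hBlist]
    simp [List.foldl_map]

-- ===== VERDICT (by name: the statement is the Claim_ definition above) =====
theorem effHarvest_spec : Claim_equal_effHarvest := by
  intro arr k _ hpre
  exact effHarvest_eq_alt arr k hpre
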